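-- pv_equiv track=rewrite | github.com/masamasamasato/python | Codility_8.py | solution
-- ===== SOURCE A (Python) =====
-- def solution(X,A):
--
--     len_A = len(A)
--     list_X = []
--     len_X = len(list_X)
--     i = 0
--
--     while len_X < X and i < len_A:
--         if A[i] <= X and A[i] not in list_X:
--             list_X.append(A[i])
--             len_X = len(list_X)
--         i +=1
--     if len_X == X:
--         return i-1
--     if i == len_A :
--         return -1
-- ===== SOURCE B (Python) =====
-- def solution(X, A):
--     # Different decomposition: record the first-occurrence index of every distinct
--     # value <= X over the WHOLE array, then select the X-th smallest of those
--     # indices (that is the moment the X-th distinct value <= X appeared).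
--     first = {}
--     for i, v in enumerate(A):
--         if v <= X and v not in first:
--             first[v] = i
--     idxs = sorted(first.values())
--     return idxs[X - 1] if 0 <= X - 1 < len(idxs) else -1
-- ===== Notes on version B (the rewrite author's own statement) =====
-- stated objective: faster
-- what changed: Instead of growing a list of distinct values with a linear membership scan per element and stopping when it reaches X, B makes one full pass building a first-occurrence-index dict for the distinct values <= X and then returns the X-th smallest of those indices (or -1 if there are fewer than X).
-- outside the precondition, e.g. on solution(-1, [7]): A returns None, B returns -1
import Mathlib
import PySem

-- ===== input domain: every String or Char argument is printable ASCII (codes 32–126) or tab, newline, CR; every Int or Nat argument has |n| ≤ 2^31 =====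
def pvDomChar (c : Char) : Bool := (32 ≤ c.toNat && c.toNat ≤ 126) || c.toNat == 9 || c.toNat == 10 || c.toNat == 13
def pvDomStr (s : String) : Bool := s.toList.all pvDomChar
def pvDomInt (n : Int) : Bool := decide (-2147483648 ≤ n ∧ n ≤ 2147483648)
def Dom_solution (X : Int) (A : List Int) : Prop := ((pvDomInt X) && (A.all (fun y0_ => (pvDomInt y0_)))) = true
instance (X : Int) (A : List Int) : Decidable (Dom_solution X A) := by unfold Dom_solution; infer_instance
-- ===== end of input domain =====

-- B replaces A's early-stopping distinct-collector (linear list-membership scan per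
-- element) by one full pass recording first-occurrence indices in a dict, then
-- selecting the X-th smallest recorded index; equivalence proved on Pre_.

-- ===== PORT A =====
-- the while loop: state (list_X, i); returns (len(list_X), i)
def solutionLoopA (X : Int) : List Int → List Int → Int → Int × Int
  | [], listX, i => ((listX.length : Int), i)
  | a :: rest, listX, i =>
    if (listX.length : Int) < X then
      if a ≤ X ∧ ¬ listX.contains a then solutionLoopA X rest (listX ++ [a]) (i + 1)
      else solutionLoopA X rest listX (i + 1)
    else ((listX.length : Int), i)

def solution (X : Int) (A : List Int) : Int :=
  let r := solutionLoopA X A [] 0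
  if r.1 = X then r.2 - 1
  else if r.2 = (A.length : Int) then -1
  else 0  -- Python falls through and returns None here (X < 0 and A ≠ []); excluded by Pre_solution

-- ===== PORT B =====
-- for i, v in enumerate(A): if v <= X and v not in first: first[v] = i
def solBuildB (X : Int) : List (Int × Int) → PySem.Dict Int Int → PySem.Dict Int Int
  | [], d => d
  | (i, v) :: rest, d =>
    if v ≤ X ∧ d.contains v = false then solBuildB X rest (d.insert v i)
    else solBuildB X rest d

def solution_alt (X : Int) (A : List Int) : Int :=
  let d := solBuildB X (PySem.List.enumerate A 0) PySem.Dict.empty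
  let idxs := PySem.List.sorted (PySem.Dict.values d) (fun x => x) false
  if 0 ≤ X - 1 ∧ X - 1 < (idxs.length : Int) then PySem.List.pyGetD idxs (X - 1) 0 else -1

-- ===== PRECONDITION & SPEC =====
-- Pre_ excludes X < 0 with nonempty A: there Python A falls off the end and returns None, not an int.
def Pre_solution (X : Int) (A : List Int) : Prop := 0 ≤ X ∨ A = []
instance (X : Int) (A : List Int) : Decidable (Pre_solution X A) := by unfold Pre_solution; infer_instance
def pvWitness_solution : Int × List Int := (2, [3, 1, 1, 2])

def Spec_solution (X : Int) (A : List Int) (out : Int) : Prop := out = solution_alt X A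
instance (X : Int) (A : List Int) (out : Int) : Decidable (Spec_solution X A out) := by unfold Spec_solution; infer_instance

-- ===== CLAIM =====
def Claim_equal_solution : Prop := ∀ (X : Int) (A : List Int), Dom_solution X A → Pre_solution X A → Spec_solution X A (solution X A)

-- ===== LEMMAS AND PROOFS =====

-- indices of first occurrences of distinct values ≤ X, scanning pairs (index, value)
def firsts (X : Int) : List (Int × Int) → List Int → List Int
  | [], _ => []
  | (i, v) :: rest, seen =>
    if v ≤ X ∧ ¬ seen.contains v then i :: firsts X rest (seen ++ [v])
    else firsts X rest seen

lemma loopA_done (X : Int) (rest listX : List Int) (i : Int) (h : ¬ (listX.length : Int) < X) :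
    solutionLoopA X rest listX i = ((listX.length : Int), i) := by
  cases rest with
  | nil => rfl
  | cons a r => simp [solutionLoopA, h]

-- B's dict values are exactly the firsts list
lemma buildB_values (X : Int) : ∀ (ps : List (Int × Int)) (d : PySem.Dict Int Int),
    PySem.Dict.values (solBuildB X ps d) = d.values ++ firsts X ps d.keys := by
  intro ps
  induction ps with
  | nil => intro d; simp [solBuildB, firsts]
  | cons p rest ih =>
    intro d
    obtain ⟨i, v⟩ := p
    have hEq : (v ≤ X ∧ d.contains v = false) ↔ (v ≤ X ∧ ¬ d.keys.contains v) := by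
      simp [← PySem.Dict.contains_iff_mem_keys]
    simp only [solBuildB, firsts]
    by_cases hc : v ≤ X ∧ ¬ d.keys.contains v
    · have hb : v ≤ X ∧ d.contains v = false := hEq.mpr hc
      rw [if_pos hb, if_pos hc, ih]
      have hitems := PySem.Dict.items_insert_of_not_contains (d := d) (k := v) (v := i) hb.2
      have hvals : (d.insert v i).values = d.values ++ [i] := by
        simp [PySem.Dict.values, hitems]
      have hkeys : (d.insert v i).keys = d.keys ++ [v] := by
        simp [PySem.Dict.keys, hitems]
      rw [hvals, hkeys]
      simp
    · rw [if_neg (fun hb => hc (hEq.mp hb)), if_neg hc, ih]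

-- firsts is strictly increasing, and each element is ≥ the start index
lemma firsts_mono (X : Int) : ∀ (l : List Int) (i : Int) (seen : List Int),
    (firsts X (PySem.List.enumerate l i) seen).Pairwise (· < ·) ∧
      ∀ j ∈ firsts X (PySem.List.enumerate l i) seen, i ≤ j := by
  intro l
  induction l with
  | nil => intro i seen; simp [PySem.List.enumerate_nil, firsts]
  | cons a r ih =>
    intro i seen
    rw [PySem.List.enumerate_cons]
    simp only [firsts]
    split_ifs with h
    · obtain ⟨hp, hge⟩ := ih (i + 1) (seen ++ [a])
      refine ⟨List.pairwise_cons.mpr ⟨fun j hj => ?_, hp⟩, ?_⟩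
      · have := hge j hj; omega
      · intro j hj
        rcases List.mem_cons.mp hj with rfl | hj
        · exact le_rfl
        · have := hge j hj; omega
    · obtain ⟨hp, hge⟩ := ih (i + 1) seen
      exact ⟨hp, fun j hj => by have := hge j hj; omega⟩

-- main correspondence: A's loop + wrapper = selection from the firsts list
lemma loopA_firsts (X : Int) : ∀ (rest listX : List Int) (i : Int) (need : Nat),
    0 < need → (listX.length : Int) + need = X →
    (if (solutionLoopA X rest listX i).1 = X then (solutionLoopA X rest listX i).2 - 1
     else if (solutionLoopA X rest listX i).2 = i + (rest.length : Int) then -1 else 0)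
    = (if need - 1 < (firsts X (PySem.List.enumerate rest i) listX).length
       then (firsts X (PySem.List.enumerate rest i) listX).getD (need - 1) 0 else -1) := by
  intro rest
  induction rest with
  | nil =>
    intro listX i need hpos hX
    have h1 : ¬ ((listX.length : Int) = X) := by omega
    simp [solutionLoopA, PySem.List.enumerate_nil, firsts, h1]
  | cons a r ih =>
    intro listX i need hpos hX
    have hlt : (listX.length : Int) < X := by omega
    rw [PySem.List.enumerate_cons]
    simp only [solutionLoopA, firsts, if_pos hlt]
    by_cases hc : a ≤ X ∧ ¬ listX.contains a
    · rw [if_pos hc, if_pos hc]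
      by_cases h1 : need = 1
      · subst h1
        have hX' : (listX.length : Int) + 1 = X := by omega
        have hdone := loopA_done X r (listX ++ [a]) (i + 1)
          (by simp only [List.length_append, List.length_cons, List.length_nil]; push_cast; omega)
        rw [hdone]
        simp [hX']
      · have h2 : 2 ≤ need := by omega
        have hrec := ih (listX ++ [a]) (i + 1) (need - 1) (by omega) (by simp; omega)
        have hn : i + ((r.length + 1 : Nat) : Int) = (i + 1) + (r.length : Int) := by push_cast; ring
        have he : need - 1 = (need - 2) + 1 := by omega
        rw [List.length_cons, hn, hrec, he, List.getD_cons_succ]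
        have e3 : need - 2 + 1 - 1 = need - 2 := by omega
        rw [e3]
        have hiff : (need - 2 + 1 < (firsts X (PySem.List.enumerate r (i + 1)) (listX ++ [a])).length + 1)
            ↔ (need - 2 < (firsts X (PySem.List.enumerate r (i + 1)) (listX ++ [a])).length) := by omega
        simp only [List.length_cons]
        simp only [hiff]
    · rw [if_neg hc, if_neg hc]
      have hrec := ih listX (i + 1) need hpos hX
      have hn : i + ((r.length + 1 : Nat) : Int) = (i + 1) + (r.length : Int) := by push_cast; ring
      rw [List.length_cons, hn, hrec]

-- ===== VERDICT =====
theorem solution_spec : Claim_equal_solution := by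
  intro X A _ hpre
  unfold Spec_solution solution solution_alt
  dsimp only
  rcases lt_trichotomy X 0 with hneg | hzero | hpos
  · rcases hpre with h | h
    · omega
    · subst h
      have h1 : ¬ ((0 : Int) = X) := by omega
      have h2 : ¬ (0 ≤ X - 1) := by omega
      simp [solutionLoopA, solBuildB, PySem.List.enumerate_nil, h1]
  · subst hzero
    have hA : solutionLoopA 0 A [] 0 = ((0 : Int), 0) := by
      simpa using loopA_done 0 A [] 0 (by simp)
    have h2 : ¬ ((0 : Int) ≤ 0 - 1) := by omega
    simp [hA]
  · -- X > 0
    have hvals : PySem.Dict.values (solBuildB X (PySem.List.enumerate A 0) PySem.Dict.empty)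
        = firsts X (PySem.List.enumerate A 0) [] := by
      rw [buildB_values]
      simp [PySem.Dict.values, PySem.Dict.empty]
    have hsorted : PySem.List.sorted (firsts X (PySem.List.enumerate A 0) []) (fun x => x) false
        = firsts X (PySem.List.enumerate A 0) [] := by
      exact PySem.List.sorted_eq_of_perm_of_pairwise_lt _ _ _ (List.Perm.refl _)
        (by simpa using (firsts_mono X A 0 []).1)
    have hm := loopA_firsts X A [] 0 X.toNat (by omega) (by simp; omega)
    simp only [zero_add] at hm
    rw [hvals, hsorted]
    set F := firsts X (PySem.List.enumerate A 0) [] with hF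
    rw [hm]
    have h0 : (0 : Int) ≤ X - 1 := by omega
    by_cases hlen : X.toNat - 1 < F.length
    · have hlt : X - 1 < (F.length : Int) := by omega
      rw [if_pos hlen, if_pos ⟨h0, hlt⟩]
      have hx : X - 1 = ((X.toNat - 1 : Nat) : Int) := by omega
      rw [hx, PySem.List.pyGetD_natCast]
    · have hnlt : ¬ (0 ≤ X - 1 ∧ X - 1 < (F.length : Int)) := by
        intro h; omega
      rw [if_neg hlen, if_neg hnlt]
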